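-- pv_equiv track=rewrite | github.com/glossyyoon/DailyCoding | 구현/87390.py | solution
-- ===== SOURCE A (Python) =====
-- def solution(n, left, right):
--     answer = [0] * (n * n)
--     for i in range(n):
--         count = 1 + i
--         for j in range(n):
--             if i == 0:
--                 answer[j] = j + 1
--             else:
--                 if j < count:
--                     answer[i * n + j] = count
--                 else:
--                     count += 1
--                     answer[i * n + j] = count
--
--     return answer[left : right + 1]
-- ===== SOURCE B (Python) =====
-- def solution(n, left, right):
--     # Closed form: the filled matrix holds max(row, col) + 1 at flat index idx,
--     # so normalize the requested window with slice.indices and compute only it.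
--     m = n * n
--     lo, hi, _ = slice(left, right + 1).indices(m)
--     return [max(divmod(idx, n)) + 1 for idx in range(lo, hi)]
-- ===== Notes on version B (the rewrite author's own statement) =====
-- stated objective: faster
-- what changed: B replaces A's O(n^2) double loop that fills the whole snail matrix with the closed form max(idx//n, idx%n)+1 evaluated only on the requested window (normalized with the stdlib slice.indices); Pre_ excludes only negative n with a nonempty window, where A returns a slice of its untouched zero buffer.
-- outside the precondition, e.g. on solution(-2, 0, 3): A returns [0, 0, 0, 0], B returns [1, 0, 1, 0]
import Mathlib
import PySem

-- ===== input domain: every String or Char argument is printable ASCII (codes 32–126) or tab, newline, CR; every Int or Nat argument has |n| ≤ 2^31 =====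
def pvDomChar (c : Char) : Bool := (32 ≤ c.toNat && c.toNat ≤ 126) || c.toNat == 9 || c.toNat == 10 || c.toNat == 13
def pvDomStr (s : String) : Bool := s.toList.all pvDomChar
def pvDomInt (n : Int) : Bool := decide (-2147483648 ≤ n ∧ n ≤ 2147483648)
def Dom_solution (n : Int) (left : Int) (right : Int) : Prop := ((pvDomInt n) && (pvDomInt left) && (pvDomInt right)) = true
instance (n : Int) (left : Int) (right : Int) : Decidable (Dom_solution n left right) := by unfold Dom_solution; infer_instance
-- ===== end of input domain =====

-- B computes only the requested window (normalized via slice.indices) with the closed form max(idx//n, idx%n)+1 instead of filling the whole n*n matrix (asymptotically faster).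


-- ===== PORT A =====
-- literal transliteration; answer[...] = v is PySem.List.pySetD (exact here: every
-- written index i*n+j with 0 ≤ i,j < n is in range of the length-n*n buffer)
def solution (n : Int) (left : Int) (right : Int) : List Int :=
  let answer : List Int := List.replicate (n * n).toNat 0
  let answer := (PySem.List.pyRange 0 n 1).foldl (fun answer i =>
    let count : Int := 1 + i
    ((PySem.List.pyRange 0 n 1).foldl (fun (st : List Int × Int) j =>
        if i = 0 then (PySem.List.pySetD st.1 j (j + 1), st.2)
        else if j < st.2 then (PySem.List.pySetD st.1 (i * n + j) st.2, st.2)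
        else (PySem.List.pySetD st.1 (i * n + j) (st.2 + 1), st.2 + 1))
      (answer, count)).1) answer
  PySem.List.slice answer (some left) (some (right + 1))

-- ===== PORT B =====
-- slice(left, right+1).indices(m) is ported by hand with its documented step-1
-- semantics (wrap a negative bound by +m, then clamp to [0, m]);
-- max(divmod(idx, n)) + 1 is max (idx // n) (idx % n) + 1
def solution_alt (n : Int) (left : Int) (right : Int) : List Int :=
  let m := n * n
  let lo := max 0 (min (if left < 0 then left + m else left) m)
  let hi := max 0 (min (if right + 1 < 0 then right + 1 + m else right + 1) m)
  (PySem.List.pyRange lo hi 1).map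
    (fun idx => max (PySem.Int.floordiv idx n) (PySem.Int.mod idx n) + 1)

-- ===== PRECONDITION & SPEC =====
-- Pre_ excludes negative n when the requested window is nonempty: there A's fill loops
-- never run and it returns a slice of its untouched zero-filled n*n buffer — an artifact
-- of the buffer allocation; B's closed form yields other values. Negative n is outside
-- the puzzle's meaning; negative n with an empty window is kept (both return []).
def Pre_solution (n : Int) (left : Int) (right : Int) : Prop :=
  0 ≤ n ∨ max 0 (min (if right + 1 < 0 then right + 1 + n * n else right + 1) (n * n))
        ≤ max 0 (min (if left < 0 then left + n * n else left) (n * n))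
instance (n : Int) (left : Int) (right : Int) : Decidable (Pre_solution n left right) := by unfold Pre_solution; infer_instance
def pvWitness_solution : Int × Int × Int := (4, 2, 7)
def Spec_solution (n : Int) (left : Int) (right : Int) (out : List Int) : Prop := out = solution_alt n left right
instance (n : Int) (left : Int) (right : Int) (out : List Int) : Decidable (Spec_solution n left right out) := by unfold Spec_solution; infer_instance

-- ===== CLAIM (what is proved, stated in full; the proofs are below) =====
def Claim_equal_solution : Prop := ∀ (n : Int) (left : Int) (right : Int), Dom_solution n left right → Pre_solution n left right → Spec_solution n left right (solution n left right)

-- ===== LEMMAS AND PROOFS =====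

-- the closed-form value of the filled matrix at flat (Nat) index k
def pvIdxVal (n : Int) (k : Nat) : Int :=
  max (PySem.Int.floordiv (k : Int) n) (PySem.Int.mod (k : Int) n) + 1

-- a fold whose step leaves the second component unchanged
theorem foldl_fst_aux (h : List Int → Int → List Int) : ∀ (l : List Int) (a : List Int) (c : Int),
    (l.foldl (fun st j => (h st.1 j, st.2)) (a, c)) = (l.foldl h a, c) := by
  intro l
  induction l with
  | nil => intro a c; rfl
  | cons x xs ih => intro a c; simp only [List.foldl_cons]; exact ih _ _

-- A's inner pair-state loop for row 0 never touches the count component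
theorem inner_zero (n : Int) (a : List Int) (c : Int) :
    ((PySem.List.pyRange 0 n 1).foldl (fun (st : List Int × Int) j =>
        if (0 : Int) = 0 then (PySem.List.pySetD st.1 j (j + 1), st.2)
        else if j < st.2 then (PySem.List.pySetD st.1 (0 * n + j) st.2, st.2)
        else (PySem.List.pySetD st.1 (0 * n + j) (st.2 + 1), st.2 + 1))
      (a, c)).1
    = (PySem.List.pyRange 0 n 1).foldl
        (fun a j => PySem.List.pySetD a (0 * n + j) (max 0 j + 1)) a := by
  simp only [ite_true]
  rw [foldl_fst_aux (fun a j => PySem.List.pySetD a j (j + 1))]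
  apply PySem.List.foldl_congr_mem
  intro acc x hx
  have hx' := PySem.List.mem_pyRange_one.mp hx
  rw [show (0:Int) * n + x = x from by ring, show max 0 x + 1 = x + 1 from by omega]

-- A's inner pair-state loop for a row i ≥ 1 equals the simple block-write loop:
-- invariant c = 1 + max i (j0 - 1) on the count component
theorem inner_inv (n i : Int) (hi : 1 ≤ i) :
    ∀ (fuel : Nat) (j0 c : Int), 0 ≤ j0 → c = 1 + max i (j0 - 1) → (n - j0).toNat ≤ fuel →
    ∀ (a : List Int),
    ((PySem.List.pyRange j0 n 1).foldl (fun (st : List Int × Int) j =>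
        if i = 0 then (PySem.List.pySetD st.1 j (j + 1), st.2)
        else if j < st.2 then (PySem.List.pySetD st.1 (i * n + j) st.2, st.2)
        else (PySem.List.pySetD st.1 (i * n + j) (st.2 + 1), st.2 + 1))
      (a, c)).1
    = (PySem.List.pyRange j0 n 1).foldl
        (fun a j => PySem.List.pySetD a (i * n + j) (max i j + 1)) a := by
  intro fuel
  induction fuel with
  | zero =>
    intro j0 c hj0 hc hfuel a
    rw [PySem.List.pyRange_one_eq_nil (show n ≤ j0 from by omega)]
    rfl
  | succ f ih =>
    intro j0 c hj0 hc hfuel a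
    by_cases hlt : j0 < n
    · rw [PySem.List.pyRange_one_cons hlt, List.foldl_cons, List.foldl_cons]
      have hstep : (if i = 0 then (PySem.List.pySetD a j0 (j0 + 1), c)
            else if j0 < c then (PySem.List.pySetD a (i * n + j0) c, c)
            else (PySem.List.pySetD a (i * n + j0) (c + 1), c + 1))
          = (PySem.List.pySetD a (i * n + j0) (max i j0 + 1), max i j0 + 1) := by
        rw [if_neg (by omega : ¬ i = 0)]
        by_cases hb : j0 < c
        · rw [if_pos hb, show c = max i j0 + 1 from by omega]
        · rw [if_neg hb, show c + 1 = max i j0 + 1 from by omega]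
      rw [hstep]
      exact ih (j0+1) (max i j0 + 1) (by omega) (by omega) (by omega) _
    · rw [PySem.List.pyRange_one_eq_nil (show n ≤ j0 from by omega)]
      rfl

-- the simple block-write loop preserves length
theorem length_setFold (idx val : Int → Int) :
    ∀ (l : List Int) (a : List Int),
    (l.foldl (fun a j => PySem.List.pySetD a (idx j) (val j)) a).length = a.length := by
  intro l
  induction l with
  | nil => intro a; rfl
  | cons x xs ih => intro a; simp only [List.foldl_cons]; rw [ih, PySem.List.length_pySetD]

-- pointwise effect of the simple block-write loop of row i
theorem row_char (n i : Int) (hi : 0 ≤ i) :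
    ∀ (fuel : Nat) (j0 : Int), 0 ≤ j0 → (n - j0).toNat ≤ fuel →
    ∀ (a : List Int), i * n + n ≤ (a.length : Int) → ∀ (k : Nat),
    ((PySem.List.pyRange j0 n 1).foldl
        (fun a j => PySem.List.pySetD a (i * n + j) (max i j + 1)) a)[k]?
    = if i * n + j0 ≤ (k : Int) ∧ (k : Int) < i * n + n
      then some (max i ((k : Int) - i * n) + 1) else a[k]? := by
  intro fuel
  induction fuel with
  | zero =>
    intro j0 hj0 hfuel a ha k
    rw [PySem.List.pyRange_one_eq_nil (show n ≤ j0 from by omega), List.foldl_nil, if_neg (by omega)]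
  | succ f ih =>
    intro j0 hj0 hfuel a ha k
    by_cases hlt : j0 < n
    · have hin : 0 ≤ i * n := mul_nonneg hi (by omega)
      rw [PySem.List.pyRange_one_cons hlt, List.foldl_cons]
      have hset : PySem.List.pySetD a (i * n + j0) (max i j0 + 1)
          = a.set (i * n + j0).toNat (max i j0 + 1) :=
        PySem.List.pySetD_of_nonneg a _ (by omega)
      rw [ih (j0+1) (by omega) (by omega) _ (by rw [PySem.List.length_pySetD]; exact ha) k, hset,
        List.getElem?_set]
      split_ifs <;> first | rfl | (exfalso; omega) | (congr 2; omega)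
    · rw [PySem.List.pyRange_one_eq_nil (show n ≤ j0 from by omega), List.foldl_nil, if_neg (by omega)]

-- pointwise effect of the whole outer loop (rows i0, i0+1, …, n-1)
theorem outer_char (n : Int) (hn : 0 < n) :
    ∀ (fuel : Nat) (i0 : Int), 0 ≤ i0 → (n - i0).toNat ≤ fuel →
    ∀ (a : List Int), (a.length : Int) = n * n → ∀ (k : Nat),
    ((PySem.List.pyRange i0 n 1).foldl (fun a i =>
        (PySem.List.pyRange 0 n 1).foldl
          (fun a j => PySem.List.pySetD a (i * n + j) (max i j + 1)) a) a)[k]?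
    = if i0 * n ≤ (k : Int) ∧ (k : Int) < n * n then some (pvIdxVal n k) else a[k]? := by
  intro fuel
  induction fuel with
  | zero =>
    intro i0 hi0 hfuel a ha k
    have : n * n ≤ i0 * n := mul_le_mul_of_nonneg_right (by omega) (by omega)
    rw [PySem.List.pyRange_one_eq_nil (show n ≤ i0 from by omega), List.foldl_nil, if_neg (by omega)]
  | succ f ih =>
    intro i0 hi0 hfuel a ha k
    by_cases hlt : i0 < n
    · rw [PySem.List.pyRange_one_cons hlt, List.foldl_cons]
      have hblock : i0 * n + n = (i0 + 1) * n := by ring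
      have hub : (i0 + 1) * n ≤ n * n := mul_le_mul_of_nonneg_right (by omega) (by omega)
      have hlb : 0 ≤ i0 * n := mul_nonneg hi0 (by omega)
      have hlen : (((PySem.List.pyRange 0 n 1).foldl
          (fun a j => PySem.List.pySetD a (i0 * n + j) (max i0 j + 1)) a).length : Int) = n * n := by
        rw [length_setFold (fun j => i0 * n + j) (fun j => max i0 j + 1)]; exact ha
      rw [ih (i0+1) (by omega) (by omega) _ hlen k]
      rw [row_char n i0 hi0 (n.toNat) 0 le_rfl (by omega) a (by omega) k]
      by_cases hrow : i0 * n ≤ (k : Int) ∧ (k : Int) < (i0 + 1) * n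
      · have hdiv : PySem.Int.floordiv (k : Int) n = i0 :=
          (PySem.Int.floordiv_eq_iff_of_pos hn).mpr ⟨by omega, by omega⟩
        have hmod : PySem.Int.mod (k : Int) n = (k : Int) - i0 * n := by
          have h := PySem.Int.floordiv_mul_add_mod (k : Int) n
          rw [hdiv] at h; omega
        rw [if_neg (by omega), if_pos (by omega), if_pos (by omega)]
        unfold pvIdxVal
        rw [hdiv, hmod]
      · split_ifs <;> first | rfl | (exfalso; omega)
    · have : n * n ≤ i0 * n := mul_le_mul_of_nonneg_right (by omega) (by omega)
      rw [PySem.List.pyRange_one_eq_nil (show n ≤ i0 from by omega), List.foldl_nil, if_neg (by omega)]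

-- slicing commutes with map
theorem slice_map (f : Int → Int) (xs : List Int) (a b : Int) :
    PySem.List.slice (xs.map f) (some a) (some b)
    = (PySem.List.slice xs (some a) (some b)).map f := by
  simp [PySem.List.slice, List.map_take, List.map_drop]

-- Python's slice-bound clamping, in closed form
theorem clampIdx_closed (m L : Int) (hm : 0 ≤ m) :
    PySem.List.clampIdx m.toNat L = (max 0 (min (if L < 0 then L + m else L) m)).toNat := by
  simp only [PySem.List.clampIdx]
  split_ifs with h1 h2 <;> omega

-- slicing a range with Python's clamping is the clamped range
theorem slice_pyRange (m L R : Int) (hm : 0 ≤ m) :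
    PySem.List.slice (PySem.List.pyRange 0 m 1) (some L) (some R)
    = PySem.List.pyRange (max 0 (min (if L < 0 then L + m else L) m))
                         (max 0 (min (if R < 0 then R + m else R) m)) 1 := by
  set X := (if L < 0 then L + m else L) with hX
  set Y := (if R < 0 then R + m else R) with hY
  set LO := max 0 (min X m) with hLO
  set HI := max 0 (min Y m) with hHI
  have hlo : 0 ≤ LO ∧ LO ≤ m := by omega
  have hhi : 0 ≤ HI ∧ HI ≤ m := by omega
  have hlen : (PySem.List.pyRange 0 m 1).length = m.toNat := by
    rw [PySem.List.length_pyRange_one]; omega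
  have hA : PySem.List.clampIdx (PySem.List.pyRange 0 m 1).length L = LO.toNat := by
    rw [hlen, clampIdx_closed m L hm]
  have hB : PySem.List.clampIdx (PySem.List.pyRange 0 m 1).length R = HI.toNat := by
    rw [hlen, clampIdx_closed m R hm]
  simp only [PySem.List.slice]
  rw [hA, hB]
  apply List.ext_getElem?
  intro k
  rw [List.getElem?_take, List.getElem?_drop, PySem.List.getElem?_pyRange_one,
    PySem.List.getElem?_pyRange_one]
  split_ifs <;> first | rfl | (exfalso; omega) | (congr 1; omega)

-- ===== VERDICT (by name: the statement is the Claim_ definition above) =====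
theorem solution_spec : Claim_equal_solution := by
  intro n left right hdom hpre
  unfold Spec_solution
  unfold Pre_solution at hpre
  by_cases hneg : n < 0
  · -- n < 0 with an empty requested window: A's loops never run and the slice of its
    -- zero buffer is empty; B's range is empty too
    have hpre' := hpre.resolve_left (by omega)
    have hnn : 0 ≤ n * n := mul_self_nonneg n
    have h1 : solution n left right = [] := by
      simp only [solution, PySem.List.pyRange_one_eq_nil (show n ≤ 0 from by omega),
        List.foldl_nil, PySem.List.slice]
      rw [List.length_replicate, clampIdx_closed (n * n) left hnn,
        clampIdx_closed (n * n) (right + 1) hnn]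
      rw [show (max 0 (min (if right + 1 < 0 then right + 1 + n * n else right + 1) (n * n))).toNat
          - (max 0 (min (if left < 0 then left + n * n else left) (n * n))).toNat = 0 from by omega]
      rfl
    have h2 : solution_alt n left right = [] := by
      simp only [solution_alt]
      rw [PySem.List.pyRange_one_eq_nil hpre']
      rfl
    rw [h1, h2]
  · have hpre : (0 : Int) ≤ n := by omega
    by_cases hn : n = 0
    · subst hn
      have h1 : solution 0 left right = [] := by
        simp [solution, PySem.List.pyRange_one_eq_nil le_rfl, PySem.List.slice]
      have h2 : solution_alt 0 left right = [] := by
        simp only [solution_alt]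
        rw [PySem.List.pyRange_one_eq_nil (by split_ifs <;> omega)]
        rfl
      rw [h1, h2]
    · have hn' : 0 < n := by omega
      simp only [solution, solution_alt]
      have h1 : (PySem.List.pyRange 0 n 1).foldl (fun answer i =>
          ((PySem.List.pyRange 0 n 1).foldl (fun (st : List Int × Int) j =>
              if i = 0 then (PySem.List.pySetD st.1 j (j + 1), st.2)
              else if j < st.2 then (PySem.List.pySetD st.1 (i * n + j) st.2, st.2)
              else (PySem.List.pySetD st.1 (i * n + j) (st.2 + 1), st.2 + 1))
            (answer, 1 + i)).1) (List.replicate (n * n).toNat 0)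
          = (PySem.List.pyRange 0 n 1).foldl (fun a i =>
              (PySem.List.pyRange 0 n 1).foldl
                (fun a j => PySem.List.pySetD a (i * n + j) (max i j + 1)) a)
            (List.replicate (n * n).toNat 0) := by
        apply PySem.List.foldl_congr_mem
        intro acc i hi
        have hi' := PySem.List.mem_pyRange_one.mp hi
        by_cases h0 : i = 0
        · subst h0; exact inner_zero n acc (1 + 0)
        · exact inner_inv n i (by omega) n.toNat 0 (1 + i) le_rfl (by omega) (by omega) acc
      rw [h1]
      have hF : (PySem.List.pyRange 0 n 1).foldl (fun a i =>
            (PySem.List.pyRange 0 n 1).foldl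
              (fun a j => PySem.List.pySetD a (i * n + j) (max i j + 1)) a)
            (List.replicate (n * n).toNat 0)
          = (PySem.List.pyRange 0 (n * n) 1).map
              (fun idx => max (PySem.Int.floordiv idx n) (PySem.Int.mod idx n) + 1) := by
        have hnn : 0 ≤ n * n := mul_nonneg hpre hpre
        apply List.ext_getElem?
        intro k
        rw [outer_char n hn' n.toNat 0 le_rfl (by omega) _
          (by rw [List.length_replicate, Int.toNat_of_nonneg hnn]) k]
        rw [List.getElem?_map, PySem.List.getElem?_pyRange_one]
        have hzn : (0 : Int) * n = 0 := by ring
        by_cases hk : (k : Int) < n * n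
        · rw [if_pos (by omega), if_pos (by omega)]
          simp only [Option.map_some]
          unfold pvIdxVal
          rw [show (0 : Int) + (k : Int) = (k : Int) from by ring]
        · rw [if_neg (by omega), if_neg (by omega)]
          simp only [Option.map_none]
          apply List.getElem?_eq_none
          rw [List.length_replicate]
          omega
      rw [hF, slice_map, slice_pyRange (n * n) left (right + 1) (mul_nonneg hpre hpre)]
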